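-- pv_equiv track=rewrite | github.com/MaheswarBabu/Virtual-Piano | pianogame.py | check_key_press
-- ===== SOURCE A (Python) =====
-- white_key_height = 200
--
-- white_keys = [
--     (0, 60),    # C
--     (60, 120),   # D
--     (120, 180),  # E
--     (180, 240), # F
--     (240, 300), # G
--     (300, 360), # A
--     (360, 420)  # B
-- ]
--
-- black_key_height = 130  # Visual height of black keys remains the same
--
-- black_keys_detection = [
--     (40, 75),   # C# (Wider detection area)
--     (100, 135), # D#
--     (220, 255), # F#
--     (280, 315), # G#
--     (340, 375)  # A#
-- ]
--
-- def check_key_press(x, y):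
--     # Check white keys
--     for i, (x_start, x_end) in enumerate(white_keys):
--         if x_start < x < x_end and y < white_key_height:  # White key area
--             return i
--     # Check black keys using the larger detection area
--     for i, (x_start, x_end) in enumerate(black_keys_detection):
--         if x_start < x < x_end and y < black_key_height + 20:  # Larger detection area for black keys
--             return i + len(white_keys)  # Offset by the number of white keys
--     return None
-- ===== SOURCE B (Python) =====
-- white_key_height = 200
--
-- black_key_height = 130
--
-- black_keys_detection = [
--     (40, 75),   # C#
--     (100, 135), # D#
--     (220, 255), # F#
--     (280, 315), # G#
--     (340, 375)  # A#
-- ]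
--
-- NUM_WHITE_KEYS = 7  # 7 white keys, each exactly 60 px wide, spanning 0..420
--
-- def check_key_press(x, y):
--     # White keys are uniform 60-wide intervals with strict borders: closed-form index.
--     if y < white_key_height and 0 < x < 420 and x % 60 != 0:
--         return int(x // 60)
--     # Black-key detection areas are irregular: scan them.
--     for i, (x_start, x_end) in enumerate(black_keys_detection):
--         if x_start < x < x_end and y < black_key_height + 20:
--             return i + NUM_WHITE_KEYS
--     return None
-- ===== Notes on version B (the rewrite author's own statement) =====
-- stated objective: simpler
-- what changed: The white-key linear interval scan is replaced by closed-form arithmetic indexing (x // 60 with strict-border checks); only the irregular black-key areas are still scanned.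
import Mathlib
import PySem

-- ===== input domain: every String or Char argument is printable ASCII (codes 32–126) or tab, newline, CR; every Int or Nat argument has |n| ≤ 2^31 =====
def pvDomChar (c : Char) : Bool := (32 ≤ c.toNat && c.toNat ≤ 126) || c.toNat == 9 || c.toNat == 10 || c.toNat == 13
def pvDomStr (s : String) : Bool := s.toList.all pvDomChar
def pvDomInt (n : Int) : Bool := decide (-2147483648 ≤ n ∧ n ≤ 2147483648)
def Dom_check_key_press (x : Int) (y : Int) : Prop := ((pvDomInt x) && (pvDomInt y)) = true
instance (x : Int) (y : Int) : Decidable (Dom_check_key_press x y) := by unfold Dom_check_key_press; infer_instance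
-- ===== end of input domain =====

-- B replaces the white-key interval scan by closed-form arithmetic indexing (x // 60 with
-- strict-border checks); the irregular black-key areas are still scanned. Objective: simpler.

-- ===== PORT A =====
def pvWhiteKeys : List (Int × Int) :=
  [(0, 60), (60, 120), (120, 180), (180, 240), (240, 300), (300, 360), (360, 420)]

def pvBlackKeysDetection : List (Int × Int) :=
  [(40, 75), (100, 135), (220, 255), (280, 315), (340, 375)]

-- the first for-loop: enumerate(white_keys), return i on the first hit
def pvWhiteLoop (x y : Int) (i : Int) : List (Int × Int) → Option Int
  | [] => none
  | (xs, xe) :: rest =>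
      if xs < x ∧ x < xe ∧ y < 200 then some i else pvWhiteLoop x y (i + 1) rest

-- the second for-loop: enumerate(black_keys_detection), return i + len(white_keys)
def pvBlackLoopA (x y : Int) (i : Int) : List (Int × Int) → Option Int
  | [] => none
  | (xs, xe) :: rest =>
      if xs < x ∧ x < xe ∧ y < 130 + 20 then some (i + 7) else pvBlackLoopA x y (i + 1) rest

def check_key_press (x : Int) (y : Int) : Option Int :=
  match pvWhiteLoop x y 0 pvWhiteKeys with
  | some i => some i
  | none => pvBlackLoopA x y 0 pvBlackKeysDetection

-- ===== PORT B =====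
def pvBlackLoopB (x y : Int) (i : Int) : List (Int × Int) → Option Int
  | [] => none
  | (xs, xe) :: rest =>
      if xs < x ∧ x < xe ∧ y < 130 + 20 then some (i + 7) else pvBlackLoopB x y (i + 1) rest

def check_key_press_alt (x : Int) (y : Int) : Option Int :=
  if y < 200 ∧ 0 < x ∧ x < 420 ∧ PySem.Int.mod x 60 ≠ 0 then
    some (PySem.Int.floordiv x 60)
  else
    pvBlackLoopB x y 0 pvBlackKeysDetection

-- ===== PRECONDITION & SPEC =====
def Spec_check_key_press (x : Int) (y : Int) (out : Option Int) : Prop := out = check_key_press_alt x y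
instance (x : Int) (y : Int) (out : Option Int) : Decidable (Spec_check_key_press x y out) := by unfold Spec_check_key_press; infer_instance

-- ===== CLAIM (what is proved, stated in full; the proofs are below) =====
def Claim_equal_check_key_press : Prop := ∀ (x : Int) (y : Int), Dom_check_key_press x y → Spec_check_key_press x y (check_key_press x y)

-- ===== LEMMAS AND PROOFS =====

-- ===== VERDICT (by name: the statement is the Claim_ definition above) =====
set_option maxHeartbeats 2000000 in
theorem check_key_press_spec : Claim_equal_check_key_press := by
  intro x y _
  unfold Spec_check_key_press check_key_press check_key_press_alt
  simp only [pvWhiteKeys, pvBlackKeysDetection, pvWhiteLoop, pvBlackLoopA, pvBlackLoopB,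
    PySem.Int.mod_eq_emod_of_pos (a := x) (show (0:Int) < 60 by norm_num),
    PySem.Int.floordiv_eq_ediv_of_pos (a := x) (show (0:Int) < 60 by norm_num)]
  split_ifs <;> first | rfl | (simp only [Option.some.injEq]; omega) | omega
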